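-- pv_equiv track=rewrite | github.com/tripp-maloney/enron_corpus_attribution | fwa_enron.py | narrow_scope
-- ===== SOURCE A (Python) =====
-- from collections import Counter
--
-- def narrow_scope(authors, lines):
--     c = Counter(authors)
--     top_2 = c.most_common(2)
--     t2 = [i[0] for i in top_2]
--     top_5 = c.most_common(5)
--     t5 = [i[0] for i in top_5]
--     top_10 = c.most_common(10)
--     t10 = [i[0] for i in top_10]
--     top_50 = c.most_common(50)
--     t50 = [i[0] for i in top_50]
--
--     narrow_2 = []
--     narrow_5 = []
--     narrow_10 = []
--     narrow_50 =[]
--     for line in lines: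
--         fields = line.lower().strip().split("\t")
--         if fields[1] in t2:
--             narrow_2.append(line)
--             narrow_5.append(line)
--             narrow_10.append(line)
--             narrow_50.append(line)
--         elif fields[1] in t5:
--             narrow_5.append(line)
--             narrow_10.append(line)
--             narrow_50.append(line)
--         elif fields[1] in t10:
--             narrow_10.append(line)
--             narrow_50.append(line)
--         elif fields[1] in t50:
--             narrow_50.append(line)
--     return narrow_2, narrow_5, narrow_10, narrow_50
-- ===== SOURCE B (Python) =====
-- from collections import Counter
--
-- def narrow_scope(authors, lines):
--     ranked = [a for a, _ in Counter(authors).most_common(50)]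
--     t2, t5, t10, t50 = ranked[:2], ranked[:5], ranked[:10], ranked
--
--     def key(line):
--         return line.lower().strip().split("\t")[1]
--
--     return ([line for line in lines if key(line) in t2],
--             [line for line in lines if key(line) in t5],
--             [line for line in lines if key(line) in t10],
--             [line for line in lines if key(line) in t50])
-- ===== Notes on version B (the rewrite author's own statement) =====
-- stated objective: simpler
-- what changed: One most_common(50) call sliced into nested prefix tiers, and the single cascaded if/elif accumulation loop is replaced by four independent one-membership filters over the lines.
import Mathlib
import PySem

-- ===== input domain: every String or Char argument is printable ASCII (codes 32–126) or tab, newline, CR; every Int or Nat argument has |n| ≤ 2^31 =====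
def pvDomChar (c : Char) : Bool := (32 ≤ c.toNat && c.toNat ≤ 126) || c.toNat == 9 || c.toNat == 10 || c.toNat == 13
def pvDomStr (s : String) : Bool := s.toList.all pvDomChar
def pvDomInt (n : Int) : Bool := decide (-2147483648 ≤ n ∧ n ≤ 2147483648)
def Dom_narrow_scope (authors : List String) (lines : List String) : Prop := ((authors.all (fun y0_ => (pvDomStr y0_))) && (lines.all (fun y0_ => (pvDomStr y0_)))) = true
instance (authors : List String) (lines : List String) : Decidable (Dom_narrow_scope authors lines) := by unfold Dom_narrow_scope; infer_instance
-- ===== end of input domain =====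

-- B restructures A: one most_common(50) sliced into the nested prefix tiers, and the cascaded
-- if/elif accumulation loop becomes four independent membership filters (same cost, simpler).

-- shared step of both Pythons: line.lower().strip().split("\t")[1]
-- (pyGetD with default "": Pre_ guarantees index 1 exists, exactly where Python does not raise)
def pvField1 (line : String) : String :=
  PySem.List.pyGetD ((PySem.Str.split? (PySem.Str.strip (PySem.Str.lower line)) "\t").getD []) 1 ""

-- ===== PORT A =====
-- the body of A's for-loop: the cascaded if/elif appends into the four accumulators
def pvCascadeStep (t2 t5 t10 t50 : List String)
    (acc : List String × List String × List String × List String) (line : String) :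
    List String × List String × List String × List String :=
  let f := pvField1 line
  if f ∈ t2 then (acc.1 ++ [line], acc.2.1 ++ [line], acc.2.2.1 ++ [line], acc.2.2.2 ++ [line])
  else if f ∈ t5 then (acc.1, acc.2.1 ++ [line], acc.2.2.1 ++ [line], acc.2.2.2 ++ [line])
  else if f ∈ t10 then (acc.1, acc.2.1, acc.2.2.1 ++ [line], acc.2.2.2 ++ [line])
  else if f ∈ t50 then (acc.1, acc.2.1, acc.2.2.1, acc.2.2.2 ++ [line])
  else acc

-- c.most_common(n) = sorted(c.items(), key=count, reverse=True)[:n]  (stable; heapq.nlargest tie rule)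
def narrow_scope (authors : List String) (lines : List String) : List String × List String × List String × List String :=
  let c := PySem.Dict.counter authors
  let s := PySem.List.sorted c.items (fun i => i.2) true
  let t2 := (s.take 2).map (fun i => i.1)
  let t5 := (s.take 5).map (fun i => i.1)
  let t10 := (s.take 10).map (fun i => i.1)
  let t50 := (s.take 50).map (fun i => i.1)
  lines.foldl (pvCascadeStep t2 t5 t10 t50) ([], [], [], [])

-- ===== PORT B =====
-- ranked[:k] is List.take k (exact: nonnegative bound, slice clamps like take)
def narrow_scope_alt (authors : List String) (lines : List String) : List String × List String × List String × List String :=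
  let ranked := ((PySem.List.sorted (PySem.Dict.counter authors).items (fun i => i.2) true).take 50).map (fun i => i.1)
  let t2 := ranked.take 2
  let t5 := ranked.take 5
  let t10 := ranked.take 10
  let t50 := ranked
  (lines.filter (fun line => decide (pvField1 line ∈ t2)),
   lines.filter (fun line => decide (pvField1 line ∈ t5)),
   lines.filter (fun line => decide (pvField1 line ∈ t10)),
   lines.filter (fun line => decide (pvField1 line ∈ t50)))

-- ===== PRECONDITION & SPEC =====
-- Pre_ excludes exactly the inputs where Python raises IndexError: a line whose
-- lowered/stripped form has no tab, so fields[1] does not exist.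
def Pre_narrow_scope (authors : List String) (lines : List String) : Prop :=
  ∀ l ∈ lines, 2 ≤ ((PySem.Str.split? (PySem.Str.strip (PySem.Str.lower l)) "\t").getD []).length
instance (authors : List String) (lines : List String) : Decidable (Pre_narrow_scope authors lines) := by unfold Pre_narrow_scope; infer_instance
def pvWitness_narrow_scope : List String × List String := (["a", "b", "a"], ["X\ta\tz", "Y\tb"])
def Spec_narrow_scope (authors : List String) (lines : List String) (out : List String × List String × List String × List String) : Prop := out = narrow_scope_alt authors lines
instance (authors : List String) (lines : List String) (out : List String × List String × List String × List String) : Decidable (Spec_narrow_scope authors lines out) := by unfold Spec_narrow_scope; infer_instance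

-- ===== CLAIM (what is proved, stated in full; the proofs are below) =====
def Claim_equal_narrow_scope : Prop := ∀ (authors : List String) (lines : List String), Dom_narrow_scope authors lines → Pre_narrow_scope authors lines → Spec_narrow_scope authors lines (narrow_scope authors lines)

-- ===== LEMMAS AND PROOFS =====

-- the cascaded elif loop, run from any accumulator, appends exactly the four membership filters,
-- provided the tiers are nested
theorem cascade_eq_filters (t2 t5 t10 t50 : List String)
    (h25 : ∀ x, x ∈ t2 → x ∈ t5) (h510 : ∀ x, x ∈ t5 → x ∈ t10) (h1050 : ∀ x, x ∈ t10 → x ∈ t50) :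
    ∀ (lines a b c d : List String),
      lines.foldl (pvCascadeStep t2 t5 t10 t50) (a, b, c, d)
      = (a ++ lines.filter (fun line => decide (pvField1 line ∈ t2)),
         b ++ lines.filter (fun line => decide (pvField1 line ∈ t5)),
         c ++ lines.filter (fun line => decide (pvField1 line ∈ t10)),
         d ++ lines.filter (fun line => decide (pvField1 line ∈ t50))) := by
  intro lines
  induction lines with
  | nil => intro a b c d; simp
  | cons l rest ih =>
    intro a b c d
    simp only [List.foldl_cons, List.filter_cons]
    by_cases h2 : pvField1 l ∈ t2
    · have h5 := h25 _ h2; have h10 := h510 _ h5; have h50 := h1050 _ h10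
      simp [pvCascadeStep, h2, h5, h10, h50, ih]
    · by_cases h5 : pvField1 l ∈ t5
      · have h10 := h510 _ h5; have h50 := h1050 _ h10
        simp [pvCascadeStep, h2, h5, h10, h50, ih]
      · by_cases h10 : pvField1 l ∈ t10
        · have h50 := h1050 _ h10
          simp [pvCascadeStep, h2, h5, h10, h50, ih]
        · by_cases h50 : pvField1 l ∈ t50
          · simp [pvCascadeStep, h2, h5, h10, h50, ih]
          · simp [pvCascadeStep, h2, h5, h10, h50, ih]

-- membership in a shorter prefix implies membership in a longer one
theorem mem_map_take_mono {α β : Type} (f : α → β) (s : List α) (m n : Nat) (hmn : m ≤ n)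
    (x : β) (hx : x ∈ (s.take m).map f) : x ∈ (s.take n).map f := by
  have h : s.take m = (s.take n).take m := by rw [List.take_take, Nat.min_eq_left hmn]
  rw [h] at hx
  exact List.map_subset f (List.take_subset _ _) hx

-- ===== VERDICT (by name: the statement is the Claim_ definition above) =====
theorem narrow_scope_spec : Claim_equal_narrow_scope := by
  intro authors lines _ _
  unfold Spec_narrow_scope narrow_scope narrow_scope_alt
  set s := PySem.List.sorted (PySem.Dict.counter authors).items (fun i => i.2) true with hs
  rw [cascade_eq_filters ((s.take 2).map (fun i => i.1)) ((s.take 5).map (fun i => i.1))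
      ((s.take 10).map (fun i => i.1)) ((s.take 50).map (fun i => i.1))
      (mem_map_take_mono _ s 2 5 (by omega)) (mem_map_take_mono _ s 5 10 (by omega))
      (mem_map_take_mono _ s 10 50 (by omega)) lines [] [] [] []]
  simp [List.map_take, List.take_take]
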